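-- pv_equiv track=rewrite | github.com/neodymium6/rust_reveri | tmp.py | get_need_r
-- ===== SOURCE A (Python) =====
-- def get_need_r(i, j):
--     put = 1 << (7 - j)
--     state8 = i << 1
--     if state8 & put:
--         # puting already put position
--         # not happen in game
--         return 0
--     if state8 & (put >> 1) == 0:
--         # no opposite stone in right
--         return 0
--     put >>= 1
--     while state8 & put:
--         put >>= 1
--     return put
-- ===== SOURCE B (Python) =====
-- def get_need_r(i, j):
--     put = 1 << (7 - j)
--     state8 = i << 1
--     if state8 & put:
--         # puting already put position
--         return 0
--     if state8 & (put >> 1) == 0: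
--         # no opposite stone in right
--         return 0
--     lowmask = (put >> 1) * 2 - 1          # bits 0 .. 6-j
--     z = (~state8) & lowmask               # clear bits of state8 in that range
--     return (1 << (z.bit_length() - 1)) if z else 0
-- ===== Notes on version B (the rewrite author's own statement) =====
-- stated objective: simpler
-- what changed: The bit-walking while loop of A is replaced by a closed-form computation: mask the unset bits of state8 below the placed stone with (~state8) & lowmask and pick the highest one via bit_length, so no loop remains.
import Mathlib
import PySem

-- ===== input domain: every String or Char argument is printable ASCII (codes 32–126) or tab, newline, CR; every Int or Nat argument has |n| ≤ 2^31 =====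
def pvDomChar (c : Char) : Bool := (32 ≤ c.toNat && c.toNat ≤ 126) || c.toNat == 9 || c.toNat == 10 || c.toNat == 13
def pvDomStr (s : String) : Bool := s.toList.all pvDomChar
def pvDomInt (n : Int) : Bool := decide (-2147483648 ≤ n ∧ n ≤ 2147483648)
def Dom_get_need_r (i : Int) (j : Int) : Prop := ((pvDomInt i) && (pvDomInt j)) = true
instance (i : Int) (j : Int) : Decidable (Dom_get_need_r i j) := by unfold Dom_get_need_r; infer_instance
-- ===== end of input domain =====

-- B replaces A's bit-walking while loop by a closed-form highest-clear-bit computation (objective: simpler).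

-- ===== PORT A =====
-- A's `while state8 & put: put >>= 1`; put is a nonnegative power of two throughout
-- the loop in Python, so it is carried as a Nat and `put >>= 1` is `put / 2` (exact).
def pyLoopA (s : Int) (put : Nat) : Int :=
  if h : PySem.Int.band s (put : Int) ≠ 0 then pyLoopA s (put / 2) else (put : Int)
termination_by put
decreasing_by
  have hput : put ≠ 0 := by
    rintro rfl
    simp [PySem.Int.band_zero] at h
  exact Nat.div_lt_self (Nat.pos_of_ne_zero hput) one_lt_two

def get_need_r (i : Int) (j : Int) : Int :=
  let put : Int := 1 <<< (7 - j).toNat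
  let state8 : Int := i <<< (1 : Nat)
  if PySem.Int.band state8 put ≠ 0 then 0
  else if PySem.Int.band state8 (put >>> (1 : Nat)) = 0 then 0
  else pyLoopA state8 (put >>> (1 : Nat)).toNat

-- ===== PORT B =====
def get_need_r_alt (i : Int) (j : Int) : Int :=
  let put : Int := 1 <<< (7 - j).toNat
  let state8 : Int := i <<< (1 : Nat)
  if PySem.Int.band state8 put ≠ 0 then 0
  else if PySem.Int.band state8 (put >>> (1 : Nat)) = 0 then 0
  else
    let lowmask : Int := (put >>> (1 : Nat)) * 2 - 1
    let z : Int := PySem.Int.band (Int.not state8) lowmask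
    if z ≠ 0 then 1 <<< (PySem.Int.bitLength z - 1) else 0

-- ===== PRECONDITION & SPEC =====
-- Pre_ excludes exactly j > 7, where Python's `1 << (7 - j)` raises ValueError (negative shift count).
def Pre_get_need_r (i : Int) (j : Int) : Prop := j ≤ 7
instance (i : Int) (j : Int) : Decidable (Pre_get_need_r i j) := by unfold Pre_get_need_r; infer_instance
def pvWitness_get_need_r : Int × Int := (18, 4)
def Spec_get_need_r (i : Int) (j : Int) (out : Int) : Prop := out = get_need_r_alt i j
instance (i : Int) (j : Int) (out : Int) : Decidable (Spec_get_need_r i j out) := by unfold Spec_get_need_r; infer_instance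

-- ===== CLAIM (what is proved, stated in full; the proofs are below) =====
def Claim_equal_get_need_r : Prop := ∀ (i : Int) (j : Int), Dom_get_need_r i j → Pre_get_need_r i j → Spec_get_need_r i j (get_need_r i j)

-- ===== LEMMAS AND PROOFS =====

-- bit t of s, in Python's infinite two's complement
def sbit (s : Int) (t : Nat) : Bool :=
  if 0 ≤ s then s.toNat.testBit t else !((-s - 1).toNat.testBit t)

def zfun (s : Int) (K : Nat) : Nat :=
  if 0 ≤ s then 2 ^ K - 1 - s.toNat % 2 ^ K else (-s - 1).toNat % 2 ^ K

theorem band_two_pow (s : Int) (k : Nat) :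
    PySem.Int.band s ((2 ^ k : Nat) : Int) = if sbit s k then ((2 ^ k : Nat) : Int) else 0 := by
  by_cases hs : 0 ≤ s
  · simp only [PySem.Int.band, sbit, hs, if_true, Int.natCast_nonneg, Int.toNat_natCast]
    rw [Nat.and_two_pow]
    cases h : s.toNat.testBit k <;> simp
  · simp only [PySem.Int.band, sbit, hs, if_false, if_true, Int.natCast_nonneg, Int.toNat_natCast]
    rw [Nat.two_pow_and]
    cases h : (-s - 1).toNat.testBit k <;> simp

theorem band_not_mask (s : Int) (K : Nat) :
    PySem.Int.band (Int.not s) (((2 ^ K : Nat) : Int) - 1) = ((zfun s K : Nat) : Int) := by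
  have hmask : (((2 ^ K : Nat) : Int) - 1) = ((2 ^ K - 1 : Nat) : Int) := by
    have : 1 ≤ 2 ^ K := Nat.one_le_two_pow
    omega
  cases s with
  | ofNat n =>
    have hnot : Int.not (Int.ofNat n) = Int.negSucc n := rfl
    rw [hnot, hmask]
    simp only [PySem.Int.band, zfun]
    have h1 : ¬ (0 : Int) ≤ Int.negSucc n := by exact of_decide_eq_false rfl
    have h2 : (0:Int) ≤ ((2 ^ K - 1 : Nat) : Int) := Int.natCast_nonneg _
    simp only [h1, h2, if_false, if_true, Int.toNat_natCast]
    have h3 : (-Int.negSucc n - 1).toNat = n := by simp [Int.negSucc_eq]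
    rw [h3, Nat.and_comm, Nat.and_two_pow_sub_one_eq_mod]
    have h4 : (0:Int) ≤ Int.ofNat n := by exact Int.natCast_nonneg n
    simp only [h4, if_true]
    congr 1
  | negSucc n =>
    have hnot : Int.not (Int.negSucc n) = Int.ofNat n := rfl
    rw [hnot, hmask]
    rw [PySem.Int.band_of_nonneg (by exact Int.natCast_nonneg n) (Int.natCast_nonneg _)]
    simp only [zfun]
    have h1 : ¬ (0 : Int) ≤ Int.negSucc n := by exact of_decide_eq_false rfl
    simp only [h1, if_false, Int.toNat_natCast]
    have h3 : (-Int.negSucc n - 1).toNat = n := by simp [Int.negSucc_eq]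
    rw [h3]
    congr 1
    show n &&& (2 ^ K - 1) = n % 2 ^ K
    exact Nat.and_two_pow_sub_one_eq_mod n K

theorem zfun_testBit (s : Int) (K t : Nat) :
    (zfun s K).testBit t = (decide (t < K) && !(sbit s t)) := by
  by_cases hs : 0 ≤ s
  · simp only [zfun, sbit, hs, if_true]
    have hlt : s.toNat % 2 ^ K < 2 ^ K := Nat.mod_lt _ (Nat.two_pow_pos K)
    have : 2 ^ K - 1 - s.toNat % 2 ^ K = 2 ^ K - (s.toNat % 2 ^ K + 1) := by omega
    rw [this, Nat.testBit_two_pow_sub_succ hlt, Nat.testBit_mod_two_pow]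
    by_cases h : t < K <;> simp [h]
  · simp only [zfun, sbit, hs, if_false]
    rw [Nat.testBit_mod_two_pow]
    by_cases h : t < K <;> simp [h]

theorem zfun_lt (s : Int) (K : Nat) : zfun s K < 2 ^ K := by
  have hp : 0 < 2 ^ K := Nat.two_pow_pos K
  by_cases hs : 0 ≤ s
  · simp only [zfun, hs, if_true]; omega
  · simp only [zfun, hs, if_false]; exact Nat.mod_lt _ hp

theorem zfun_shrink (s : Int) (k : Nat) (hb : sbit s (k + 1) = true) :
    zfun s (k + 2) = zfun s (k + 1) := by
  apply Nat.eq_of_testBit_eq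
  intro t
  rw [zfun_testBit, zfun_testBit]
  by_cases h1 : t < k + 1
  · have h2 : t < k + 2 := by omega
    simp [h1, h2]
  · by_cases h2 : t = k + 1
    · subst h2; simp [hb]
    · have h3 : ¬ t < k + 2 := by omega
      simp [h1, h3]

theorem zfun_top (s : Int) (k : Nat) (hb : sbit s k = false) :
    zfun s (k + 1) ≠ 0 ∧ Nat.log2 (zfun s (k + 1)) = k := by
  have hbit : (zfun s (k + 1)).testBit k = true := by
    rw [zfun_testBit]; simp [hb]
  have hge : 2 ^ k ≤ zfun s (k + 1) := Nat.ge_two_pow_of_testBit hbit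
  have hne : zfun s (k + 1) ≠ 0 := by
    have : 0 < 2 ^ k := Nat.two_pow_pos k
    omega
  refine ⟨hne, ?_⟩
  rw [Nat.log2_eq_iff hne]
  exact ⟨hge, zfun_lt s (k + 1)⟩

theorem loop_spec (s : Int) (k : Nat) :
    pyLoopA s (2 ^ k) =
      if zfun s (k + 1) = 0 then 0 else ((2 ^ Nat.log2 (zfun s (k + 1)) : Nat) : Int) := by
  induction k with
  | zero =>
    rw [pyLoopA]
    have hb := band_two_pow s 0
    cases hb0 : sbit s 0
    · rw [hb0] at hb; simp only [Bool.false_eq_true, if_false] at hb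
      rw [dif_neg (by push_cast at hb; simp [hb])]
      obtain ⟨hne, hlog⟩ := zfun_top s 0 hb0
      rw [if_neg hne, hlog]
    · rw [hb0] at hb; simp only [if_true] at hb
      rw [dif_pos (by push_cast at hb ⊢; rw [hb]; norm_num)]
      rw [show (2:Nat) ^ 0 / 2 = 0 from rfl, pyLoopA]
      rw [dif_neg (by simp [PySem.Int.band_zero])]
      have hz : zfun s 1 = 0 := by
        apply Nat.eq_of_testBit_eq
        intro t
        rw [zfun_testBit, Nat.zero_testBit]
        by_cases h1 : t < 1
        · have ht : t = 0 := by omega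
          subst ht; simp [hb0]
        · simp [h1]
      rw [if_pos hz]
      norm_num
  | succ k ih =>
    rw [pyLoopA]
    have hb := band_two_pow s (k + 1)
    cases hb0 : sbit s (k + 1)
    · rw [hb0] at hb; simp only [Bool.false_eq_true, if_false] at hb
      rw [dif_neg (by push_cast at hb; simp [hb])]
      obtain ⟨hne, hlog⟩ := zfun_top s (k + 1) hb0
      rw [if_neg hne, hlog]
    · rw [hb0] at hb; simp only [if_true] at hb
      have hpos : ((2 ^ (k+1) : Nat) : Int) ≠ 0 := by
        have := Nat.two_pow_pos (k+1)
        omega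
      rw [dif_pos (by push_cast at hb ⊢; rw [hb]; push_cast at hpos; exact hpos)]
      have hdiv : 2 ^ (k + 1) / 2 = 2 ^ k := by
        rw [pow_succ]
        exact Nat.mul_div_cancel _ (by norm_num)
      rw [hdiv, ih, show k + 1 + 1 = k + 2 from rfl, zfun_shrink s k hb0]

theorem bitLength_natCast_pos (w : Nat) (hw : w ≠ 0) :
    PySem.Int.bitLength (w : Int) = Nat.log2 w + 1 := by
  have h1 : w < 2 ^ PySem.Int.bitLength (w : Int) := by
    have := PySem.Int.lt_two_pow_bitLength (w : Int)
    simpa using this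
  have hne : (w : Int) ≠ 0 := by omega
  have h2 : 2 ^ (PySem.Int.bitLength (w : Int) - 1) ≤ w := by
    have := PySem.Int.two_pow_bitLength_le (w : Int) hne
    simpa using this
  have hL : PySem.Int.bitLength (w : Int) ≠ 0 := by
    intro h0
    rw [h0] at h1
    simp at h1
    omega
  have : Nat.log2 w = PySem.Int.bitLength (w : Int) - 1 := by
    rw [Nat.log2_eq_iff hw]
    constructor
    · exact h2
    · have : PySem.Int.bitLength (w : Int) - 1 + 1 = PySem.Int.bitLength (w : Int) := by omega
      rw [this]; exact h1
  omega

theorem main_eq (i j : Int) : get_need_r i j = get_need_r_alt i j := by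
  simp only [get_need_r, get_need_r_alt]
  have hput : (1 <<< (7 - j).toNat : Int) = ((2 ^ (7 - j).toNat : Nat) : Int) := by
    push_cast [Nat.shiftLeft_eq]; ring
  rw [hput]
  set s : Int := i <<< (1 : Nat) with hs
  cases hn : (7 - j).toNat with
  | zero =>
    have h1 : (((2 ^ 0 : Nat) : Int)) >>> (1 : Nat) = 0 := by decide
    rw [h1]
    simp [PySem.Int.band_zero]
  | succ m =>
    have h1 : (((2 ^ (m + 1) : Nat) : Int)) >>> (1 : Nat) = ((2 ^ m : Nat) : Int) := by
      rw [← Int.natCast_shiftRight]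
      congr 1
      rw [Nat.shiftRight_succ, Nat.shiftRight_zero, pow_succ]
      exact Nat.mul_div_cancel _ (by norm_num)
    rw [h1]
    by_cases g1 : PySem.Int.band s ((2 ^ (m + 1) : Nat) : Int) ≠ 0
    · rw [if_pos g1, if_pos g1]
    · rw [if_neg g1, if_neg g1]
      by_cases g2 : PySem.Int.band s ((2 ^ m : Nat) : Int) = 0
      · rw [if_pos g2, if_pos g2]
      · rw [if_neg g2, if_neg g2]
        have htn : (((2 ^ m : Nat) : Int)).toNat = 2 ^ m := Int.toNat_natCast _
        rw [htn, loop_spec s m]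
        have hmask : (((2 ^ m : Nat) : Int)) * 2 - 1 = ((2 ^ (m + 1) : Nat) : Int) - 1 := by
          push_cast; ring
        rw [hmask, band_not_mask s (m + 1)]
        by_cases hw : zfun s (m + 1) = 0
        · rw [if_pos hw, hw]
          simp
        · rw [if_neg hw]
          rw [if_pos (by exact_mod_cast hw)]
          rw [bitLength_natCast_pos _ hw]
          push_cast [Nat.shiftLeft_eq]
          ring

-- ===== VERDICT (by name: the statement is the Claim_ definition above) =====
theorem get_need_r_spec : Claim_equal_get_need_r := by
  intro i j _ _
  exact main_eq i j
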